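-- pv_equiv track=rewrite | github.com/pacifik80/comfy-ess | scene_nodes/prompt_parser.py | _split_variant_segments
-- ===== SOURCE A (Python) =====
-- from typing import List, Tuple, Dict, Optional, Union
--
-- def _split_variant_segments(content: str) -> List[str]:
--     segments = []
--     current = []
--     angle_depth = 0
--     brace_depth = 0
--     bracket_depth = 0
--     i = 0
--     while i < len(content):
--         pair = content[i:i+2]
--         if pair == "<<":
--             angle_depth += 1
--             current.append(pair)
--             i += 2
--             continue
--         if pair == ">>":
--             if angle_depth > 0:
--                 angle_depth -= 1
--             current.append(pair)
--             i += 2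
--             continue
--         if content[i] == "{":
--             brace_depth += 1
--         elif content[i] == "}":
--             brace_depth = max(0, brace_depth - 1)
--         elif content[i] == "[":
--             bracket_depth += 1
--         elif content[i] == "]":
--             bracket_depth = max(0, bracket_depth - 1)
--
--         if pair == "||" and angle_depth == 0 and brace_depth == 0 and bracket_depth == 0:
--             segments.append("".join(current))
--             current = []
--             i += 2
--             continue
--
--         current.append(content[i])
--         i += 1
--
--     if current:
--         segments.append("".join(current))
--
--     return segments
-- ===== SOURCE B (Python) =====
-- def _split_variant_segments(content: str):
--     # Different decomposition: a helper finds the NEXT top-level "||" in a string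
--     # that starts at depth zero, and the outer loop peels off one segment at a
--     # time.  This is correct because A's separator test requires all three depth
--     # counters to be zero at the separator, so the scan state after a separator
--     # is always the fresh zero state.
--     def find_sep(s):
--         a = b = k = 0
--         i = 0
--         while i < len(s):
--             pair = s[i:i+2]
--             if pair == "||" and a == 0 and b == 0 and k == 0:
--                 return i
--             if pair == "<<":
--                 a += 1
--                 i += 2
--                 continue
--             if pair == ">>":
--                 a = max(0, a - 1)
--                 i += 2
--                 continue
--             c = s[i]
--             if c == "{":
--                 b += 1
--             elif c == "}":
--                 b = max(0, b - 1)
--             elif c == "[":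
--                 k += 1
--             elif c == "]":
--                 k = max(0, k - 1)
--             i += 1
--         return None
--
--     segments = []
--     rest = content
--     while True:
--         i = find_sep(rest)
--         if i is None:
--             break
--         segments.append(rest[:i])
--         rest = rest[i+2:]
--     if rest:
--         segments.append(rest)
--     return segments
-- ===== Notes on version B (the rewrite author's own statement) =====
-- stated objective: alternative
-- what changed: B replaces A's single monolithic scan with a buffer by a segment-at-a-time decomposition: a helper scans for the next top-level '||' from a fresh zero-depth state and returns its index (or None), and an outer loop repeatedly slices off one segment and recurses on the remainder; this is correct because A's separator test requires all depth counters to be zero at the separator.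
import Mathlib
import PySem

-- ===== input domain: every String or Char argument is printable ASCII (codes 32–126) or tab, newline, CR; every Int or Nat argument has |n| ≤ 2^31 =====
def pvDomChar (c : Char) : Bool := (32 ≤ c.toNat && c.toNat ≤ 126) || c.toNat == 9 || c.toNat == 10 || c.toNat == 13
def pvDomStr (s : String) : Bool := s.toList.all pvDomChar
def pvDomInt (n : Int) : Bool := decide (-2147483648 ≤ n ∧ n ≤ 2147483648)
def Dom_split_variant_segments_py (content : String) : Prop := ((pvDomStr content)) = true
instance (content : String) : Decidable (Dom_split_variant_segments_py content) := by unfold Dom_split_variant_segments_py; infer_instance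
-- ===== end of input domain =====

-- B uses a segment-at-a-time decomposition (find next top-level '||', slice, recurse) instead of A's single buffered scan; same return value.

-- ===== PORT A =====
-- A's while-loop: remaining chars drive the recursion; `cur` is the `current` buffer
-- (a list of chars: "".join of the appended 1/2-char strings is their char concatenation).
def loopA : List Char → Nat → Nat → Nat → List Char → List String → List String
  | [], _, _, _, cur, segs => if cur = [] then segs else segs ++ [String.ofList cur]
  | [c], a, b, k, cur, segs =>
      -- last char: content[i:i+2] has length 1, so no 2-char token can match
      let b' := if c = '{' then b + 1 else if c = '}' then b - 1 else b
      let k' := if c = '[' then k + 1 else if c = ']' then k - 1 else k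
      loopA [] a b' k' (cur ++ [c]) segs
  | c1 :: c2 :: rest, a, b, k, cur, segs =>
      if c1 = '<' ∧ c2 = '<' then
        loopA rest (a + 1) b k (cur ++ [c1, c2]) segs
      else if c1 = '>' ∧ c2 = '>' then
        loopA rest (if a > 0 then a - 1 else a) b k (cur ++ [c1, c2]) segs
      else
        let b' := if c1 = '{' then b + 1 else if c1 = '}' then b - 1 else b
        let k' := if c1 = '[' then k + 1 else if c1 = ']' then k - 1 else k
        if c1 = '|' ∧ c2 = '|' ∧ a = 0 ∧ b' = 0 ∧ k' = 0 then
          loopA rest a b' k' [] (segs ++ [String.ofList cur])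
        else
          loopA (c2 :: rest) a b' k' (cur ++ [c1]) segs

def split_variant_segments_py (content : String) : List String :=
  loopA content.toList 0 0 0 [] []

-- ===== PORT B =====
-- B's helper find_sep: index of the first top-level "||" of its argument, scanning
-- from the fresh zero-depth state; `none` = Python's None.  Nat subtraction `a - 1`
-- is exactly Python's max(0, a - 1).  The separator test comes first, on the
-- pre-update depths ('|' never changes a depth counter).
def findSep : List Char → Nat → Nat → Nat → Nat → Option Nat
  | [], _, _, _, _ => none
  | [c], i, a, b, k =>
      -- a 1-char tail: pair has length 1, only the single-char depth updates run
      findSep [] (i + 1) a (if c = '{' then b + 1 else if c = '}' then b - 1 else b)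
        (if c = '[' then k + 1 else if c = ']' then k - 1 else k)
  | c1 :: c2 :: rest, i, a, b, k =>
      if c1 = '|' ∧ c2 = '|' ∧ a = 0 ∧ b = 0 ∧ k = 0 then some i
      else if c1 = '<' ∧ c2 = '<' then findSep rest (i + 2) (a + 1) b k
      else if c1 = '>' ∧ c2 = '>' then findSep rest (i + 2) (a - 1) b k
      else
        findSep (c2 :: rest) (i + 1) a
          (if c1 = '{' then b + 1 else if c1 = '}' then b - 1 else b)
          (if c1 = '[' then k + 1 else if c1 = ']' then k - 1 else k)

-- B's outer while-loop: peel off one segment per found separator; the trailing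
-- remainder is kept only if nonempty (`if rest:`).
def splitB (cs : List Char) : List String :=
  match h : findSep cs 0 0 0 0 with
  | some i => String.ofList (cs.take i) :: splitB (cs.drop (i + 2))
  | none => if cs = [] then [] else [String.ofList cs]
termination_by cs.length
decreasing_by
  have hne : cs ≠ [] := by intro e; subst e; simp [findSep] at h
  cases cs with
  | nil => exact absurd rfl hne
  | cons x xs => simp only [List.length_drop, List.length_cons]; omega

def split_variant_segments_py_alt (content : String) : List String :=
  splitB content.toList

-- ===== PRECONDITION & SPEC =====
def Spec_split_variant_segments_py (content : String) (out : List String) : Prop := out = split_variant_segments_py_alt content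
instance (content : String) (out : List String) : Decidable (Spec_split_variant_segments_py content out) := by unfold Spec_split_variant_segments_py; infer_instance

-- ===== CLAIM (what is proved, stated in full; the proofs are below) =====
def Claim_equal_split_variant_segments_py : Prop := ∀ (content : String), Dom_split_variant_segments_py content → Spec_split_variant_segments_py content (split_variant_segments_py content)

-- ===== LEMMAS AND PROOFS =====

-- the separator index is relative to the initial value of `i`
theorem findSep_shift (s : List Char) (i a b k : Nat) :
    findSep s i a b k = (findSep s 0 a b k).map (· + i) := by
  rcases s with _ | ⟨c1, _ | ⟨c2, rest⟩⟩
  · simp [findSep]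
  · simp [findSep]
  · by_cases h0 : c1 = '|' ∧ c2 = '|' ∧ a = 0 ∧ b = 0 ∧ k = 0
    · simp [findSep, h0]
    · by_cases h1 : c1 = '<' ∧ c2 = '<'
      · simp only [findSep, if_neg h0, if_pos h1]
        rw [findSep_shift rest (i + 2), findSep_shift rest 2]
        cases findSep rest 0 (a + 1) b k with
        | none => simp
        | some j => simp; omega
      · by_cases h2 : c1 = '>' ∧ c2 = '>'
        · simp only [findSep, if_neg h0, if_neg h1, if_pos h2]
          rw [findSep_shift rest (i + 2), findSep_shift rest 2]
          cases findSep rest 0 (a - 1) b k with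
          | none => simp
          | some j => simp; omega
        · simp only [findSep, if_neg h0, if_neg h1, if_neg h2]
          rw [findSep_shift (c2 :: rest) (i + 1), findSep_shift (c2 :: rest) 1]
          cases findSep (c2 :: rest) 0 a _ _ with
          | none => simp
          | some j => simp; omega
termination_by s.length
decreasing_by all_goals (simp only [List.length_cons]; omega)

-- proof-only abbreviation: what A's loop still has to produce from state (cur, a, b, k)
def bTail (cur s : List Char) (a b k : Nat) : List String :=
  match findSep s 0 a b k with
  | some j => String.ofList (cur ++ s.take j) :: splitB (s.drop (j + 2))
  | none => if cur ++ s = [] then [] else [String.ofList (cur ++ s)]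

theorem bTail_nil (s : List Char) : bTail [] s 0 0 0 = splitB s := by
  rw [splitB]; unfold bTail
  cases h : findSep s 0 0 0 0 with
  | none => simp
  | some j => simp

theorem bTail_step2 (c1 c2 : Char) (rest cur : List Char) (a b k a' b' k' : Nat)
    (hf : findSep (c1 :: c2 :: rest) 0 a b k = (findSep rest 0 a' b' k').map (· + 2)) :
    bTail cur (c1 :: c2 :: rest) a b k = bTail (cur ++ [c1, c2]) rest a' b' k' := by
  unfold bTail
  rw [hf]
  cases h : findSep rest 0 a' b' k' with
  | none => simp
  | some j =>
      simp only [Option.map_some]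
      rw [show j + 2 + 2 = (j + 2) + 1 + 1 from rfl, show j + 2 = j + 1 + 1 from rfl]
      simp [List.take_succ_cons, List.drop_succ_cons]

theorem bTail_step1 (c1 : Char) (s2 cur : List Char) (a b k a' b' k' : Nat)
    (hf : findSep (c1 :: s2) 0 a b k = (findSep s2 0 a' b' k').map (· + 1)) :
    bTail cur (c1 :: s2) a b k = bTail (cur ++ [c1]) s2 a' b' k' := by
  unfold bTail
  rw [hf]
  cases h : findSep s2 0 a' b' k' with
  | none => simp
  | some j =>
      simp only [Option.map_some]
      rw [show j + 1 + 2 = (j + 2) + 1 from rfl]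
      simp [List.take_succ_cons, List.drop_succ_cons]

theorem main_lemma (s : List Char) (a b k : Nat) (cur : List Char) (segs : List String) :
    loopA s a b k cur segs = segs ++ bTail cur s a b k := by
  rcases s with _ | ⟨c1, _ | ⟨c2, rest⟩⟩
  · unfold bTail
    simp only [loopA, findSep]
    by_cases h : cur = [] <;> simp [h]
  · simp only [loopA]
    unfold bTail
    simp [findSep]
  · by_cases h1 : c1 = '<' ∧ c2 = '<'
    · simp only [loopA, if_pos h1]
      rw [main_lemma rest (a + 1) b k (cur ++ [c1, c2]) segs]
      rw [bTail_step2 c1 c2 rest cur a b k (a + 1) b k]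
      obtain ⟨e1, e2⟩ := h1; subst e1; subst e2
      simp only [findSep]
      rw [if_neg (by simp), if_pos (by simp)]
      exact findSep_shift rest 2 (a + 1) b k
    · by_cases h2 : c1 = '>' ∧ c2 = '>'
      · simp only [loopA, if_neg h1, if_pos h2]
        rw [main_lemma rest (if a > 0 then a - 1 else a) b k (cur ++ [c1, c2]) segs]
        have hsub : (if a > 0 then a - 1 else a) = a - 1 := by split <;> omega
        rw [hsub, bTail_step2 c1 c2 rest cur a b k (a - 1) b k]
        obtain ⟨e1, e2⟩ := h2; subst e1; subst e2
        simp only [findSep]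
        rw [if_neg (by simp), if_neg (by simp), if_pos (by simp)]
        exact findSep_shift rest 2 (a - 1) b k
      · by_cases h3 : c1 = '|' ∧ c2 = '|' ∧ a = 0 ∧
            (if c1 = '{' then b + 1 else if c1 = '}' then b - 1 else b) = 0 ∧
            (if c1 = '[' then k + 1 else if c1 = ']' then k - 1 else k) = 0
        · obtain ⟨e1, e2, ea, eb, ek⟩ := h3
          subst e1; subst e2; subst ea
          have hb : b = 0 := by simpa using eb
          have hk : k = 0 := by simpa using ek
          subst hb; subst hk
          simp only [loopA, if_neg h1, if_neg h2]
          rw [if_pos ⟨trivial, trivial, trivial, eb, ek⟩]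
          simp only [show (if ('|' : Char) = '{' then (0 : Nat) + 1 else if ('|' : Char) = '}' then 0 - 1 else 0) = 0 from by simp,
            show (if ('|' : Char) = '[' then (0 : Nat) + 1 else if ('|' : Char) = ']' then 0 - 1 else 0) = 0 from by simp]
          rw [main_lemma rest 0 0 0 [] (segs ++ [String.ofList cur])]
          have hsep : findSep ('|' :: '|' :: rest) 0 0 0 0 = some 0 := by
            simp only [findSep]; rw [if_pos (by simp)]
          have hrhs : bTail cur ('|' :: '|' :: rest) 0 0 0 = String.ofList cur :: splitB rest := by
            unfold bTail
            rw [hsep]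
            simp [show (0 : Nat) + 2 = 1 + 1 from rfl, List.drop_succ_cons]
          rw [hrhs, bTail_nil]
          simp
        · simp only [loopA, if_neg h1, if_neg h2, if_neg h3]
          rw [main_lemma (c2 :: rest) a _ _ (cur ++ [c1]) segs]
          rw [bTail_step1 c1 (c2 :: rest) cur a b k a
            (if c1 = '{' then b + 1 else if c1 = '}' then b - 1 else b)
            (if c1 = '[' then k + 1 else if c1 = ']' then k - 1 else k)]
          have hb1 : ¬(c1 = '|' ∧ c2 = '|' ∧ a = 0 ∧ b = 0 ∧ k = 0) := by
            rintro ⟨e1, e2, ea, eb, ek⟩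
            exact h3 ⟨e1, e2, ea, by subst e1; simpa using eb, by subst e1; simpa using ek⟩
          simp only [findSep, if_neg hb1, if_neg h1, if_neg h2]
          exact findSep_shift (c2 :: rest) 1 a _ _
termination_by s.length
decreasing_by all_goals (simp only [List.length_cons]; omega)

-- ===== VERDICT (by name: the statement is the Claim_ definition above) =====
theorem split_variant_segments_py_spec : Claim_equal_split_variant_segments_py := by
  intro content _
  unfold Spec_split_variant_segments_py split_variant_segments_py split_variant_segments_py_alt
  rw [main_lemma content.toList 0 0 0 [] [], bTail_nil]
  simp
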